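-- pv_equiv track=rewrite | github.com/backskin/my-nirs-two | tests1.py | get_smallest_bitmap
-- ===== SOURCE A (Python) =====
-- def bitmap_sum(bitmap: list):
--     summary = 0
--     string: list
--     for string in bitmap:
--         for elm in string:
--             summary += elm
--     return summary
--
-- def get_smallest_bitmap(bitmaps: list):
--     sums = []
--     for bm in bitmaps:
--         sums += [bitmap_sum(bm)]
--
--     smallest = 0
--     for i in range(len(sums)):
--         if sums[i] < sums[smallest]:
--             smallest = i
--
--     return smallest, bitmaps[smallest]
-- ===== SOURCE B (Python) =====
-- def get_smallest_bitmap(bitmaps: list):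
--     order = sorted(range(len(bitmaps)),
--                    key=lambda i: (sum(v for row in bitmaps[i] for v in row), i))
--     smallest = order[0]
--     return smallest, bitmaps[smallest]
-- ===== Notes on version B (the rewrite author's own statement) =====
-- stated objective: alternative
-- what changed: Replaces the sums-list build plus linear argmin scan with sorting the index range by the key (bitmap sum, index) and taking the head of the sorted order; the index tie-break makes the key unique, so the head is exactly A's first index of minimal sum.
import Mathlib
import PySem

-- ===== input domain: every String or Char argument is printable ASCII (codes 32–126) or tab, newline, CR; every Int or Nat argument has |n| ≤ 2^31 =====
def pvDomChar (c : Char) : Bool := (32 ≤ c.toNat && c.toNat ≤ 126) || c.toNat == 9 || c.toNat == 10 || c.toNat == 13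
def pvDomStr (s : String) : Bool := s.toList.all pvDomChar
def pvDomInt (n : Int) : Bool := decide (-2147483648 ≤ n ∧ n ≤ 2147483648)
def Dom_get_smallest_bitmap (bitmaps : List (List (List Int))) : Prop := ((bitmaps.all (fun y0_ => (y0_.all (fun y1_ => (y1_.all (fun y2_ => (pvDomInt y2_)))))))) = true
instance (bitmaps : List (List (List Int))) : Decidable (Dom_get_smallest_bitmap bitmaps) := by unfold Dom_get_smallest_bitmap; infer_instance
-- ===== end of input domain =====

-- B sorts the index range by the unique key (bitmap sum, index) and returns the head of the
-- sorted order, instead of building a sums list and scanning it for the argmin (alternative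
-- algorithm, same result; neither program mutates its argument).

-- ===== PORT A =====
def bitmap_sum (bitmap : List (List Int)) : Int :=
  bitmap.foldl (fun summary string => string.foldl (fun s elm => s + elm) summary) 0

def get_smallest_bitmap (bitmaps : List (List (List Int))) : Int × List (List Int) :=
  let sums := bitmaps.foldl (fun acc bm => acc ++ [bitmap_sum bm]) ([] : List Int)
  let smallest := (PySem.List.pyRange 0 (sums.length : Int) 1).foldl
      (fun sm i => if PySem.List.pyGetD sums i 0 < PySem.List.pyGetD sums sm 0 then i else sm)
      (0 : Int)
  (smallest, (PySem.List.pyGet? bitmaps smallest).getD [])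

-- ===== PORT B =====
-- sum(v for row in bitmaps[i] for v in row)
def bm_key (bitmaps : List (List (List Int))) (i : Int) : Int :=
  (((PySem.List.pyGet? bitmaps i).getD []).flatMap (fun row => row)).sum

def get_smallest_bitmap_alt (bitmaps : List (List (List Int))) : Int × List (List Int) :=
  let order := PySem.List.sorted2 (PySem.List.pyRange 0 (bitmaps.length : Int) 1)
      (bm_key bitmaps) (fun i => i) false
  let smallest := (PySem.List.pyGet? order 0).getD 0   -- order[0]; in range by Pre_
  (smallest, (PySem.List.pyGet? bitmaps smallest).getD [])

-- ===== PRECONDITION & SPEC =====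
-- Pre_ excludes only the empty list, on which Python A raises IndexError at bitmaps[smallest].
def Pre_get_smallest_bitmap (bitmaps : List (List (List Int))) : Prop := bitmaps ≠ []
instance (bitmaps : List (List (List Int))) : Decidable (Pre_get_smallest_bitmap bitmaps) := by unfold Pre_get_smallest_bitmap; infer_instance
def pvWitness_get_smallest_bitmap : List (List (List Int)) := [[[1, 2]], [[0]]]

def Spec_get_smallest_bitmap (bitmaps : List (List (List Int))) (out : Int × List (List Int)) : Prop := out = get_smallest_bitmap_alt bitmaps
instance (bitmaps : List (List (List Int))) (out : Int × List (List Int)) : Decidable (Spec_get_smallest_bitmap bitmaps out) := by unfold Spec_get_smallest_bitmap; infer_instance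

-- ===== CLAIM (what is proved, stated in full; the proofs are below) =====
def Claim_equal_get_smallest_bitmap : Prop := ∀ (bitmaps : List (List (List Int))), Dom_get_smallest_bitmap bitmaps → Pre_get_smallest_bitmap bitmaps → Spec_get_smallest_bitmap bitmaps (get_smallest_bitmap bitmaps)

-- ===== LEMMAS AND PROOFS =====

-- the lex ≤ relation that B's comparator sorts by (k2 = identity)
def LexLe (k1 : Int → Int) (a b : Int) : Prop := k1 a < k1 b ∨ (k1 a = k1 b ∧ a ≤ b)

theorem lexle_refl (k1 : Int → Int) (a : Int) : LexLe k1 a a := Or.inr ⟨rfl, le_refl a⟩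

theorem lexle_trans (k1 : Int → Int) {a b c : Int} (h1 : LexLe k1 a b) (h2 : LexLe k1 b c) :
    LexLe k1 a c := by
  rcases h1 with h1 | ⟨e1, l1⟩ <;> rcases h2 with h2 | ⟨e2, l2⟩
  · exact Or.inl (lt_trans h1 h2)
  · exact Or.inl (e2 ▸ h1)
  · exact Or.inl (e1 ▸ h2)
  · exact Or.inr ⟨e1.trans e2, le_trans l1 l2⟩

-- B's comparator (the `before` inside sorted2 with keys (k1, id))
def lexLt (k1 : Int → Int) (a b : Int) : Bool :=
  decide (k1 a < k1 b) || (!decide (k1 b < k1 a) && decide (a < b))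

theorem lexLt_true_lexle (k1 : Int → Int) {a b : Int} (h : lexLt k1 a b = true) : LexLe k1 a b := by
  unfold lexLt at h
  unfold LexLe
  simp only [Bool.or_eq_true, Bool.and_eq_true, Bool.not_eq_true', decide_eq_true_eq,
    decide_eq_false_iff_not] at h
  omega

theorem lexLt_false_lexle (k1 : Int → Int) {a b : Int} (h : lexLt k1 a b = false) : LexLe k1 b a := by
  unfold lexLt at h
  unfold LexLe
  simp only [Bool.or_eq_false_iff, Bool.and_eq_false_iff, Bool.not_eq_false', decide_eq_true_eq,
    decide_eq_false_iff_not] at h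
  omega

theorem insertBy_lex_pairwise (k1 : Int → Int) (x : Int) (ys : List Int)
    (h : ys.Pairwise (LexLe k1)) :
    (PySem.List.insertBy (lexLt k1) x ys).Pairwise (LexLe k1) := by
  induction ys with
  | nil => simp [PySem.List.insertBy]
  | cons y t ih =>
    obtain ⟨hy, ht⟩ := List.pairwise_cons.mp h
    simp only [PySem.List.insertBy]
    by_cases hb : lexLt k1 x y = true
    · rw [if_pos hb]
      refine List.Pairwise.cons ?_ (List.Pairwise.cons hy ht)
      intro z hz
      rcases List.mem_cons.mp hz with rfl | hz
      · exact lexLt_true_lexle k1 hb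
      · exact lexle_trans k1 (lexLt_true_lexle k1 hb) (hy z hz)
    · rw [if_neg hb]
      refine List.Pairwise.cons ?_ (ih ht)
      intro z hz
      rcases (PySem.List.insertBy_mem_iff (lexLt k1) x z t).mp hz with rfl | hz
      · exact lexLt_false_lexle k1 (Bool.not_eq_true _ ▸ hb)
      · exact hy z hz

theorem foldl_insertBy_lex_pairwise (k1 : Int → Int) (xs : List Int) : ∀ (acc : List Int),
    acc.Pairwise (LexLe k1) →
    (xs.foldl (fun acc x => PySem.List.insertBy (lexLt k1) x acc) acc).Pairwise (LexLe k1) := by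
  induction xs with
  | nil => intro acc h; exact h
  | cons x t ih =>
    intro acc h
    exact ih _ (insertBy_lex_pairwise k1 x acc h)

theorem sorted2_lex_pairwise (xs : List Int) (k1 : Int → Int) :
    (PySem.List.sorted2 xs k1 (fun i => i) false).Pairwise (LexLe k1) := by
  have : PySem.List.sorted2 xs k1 (fun i => i) false
      = xs.foldl (fun acc x => PySem.List.insertBy (lexLt k1) x acc) [] := rfl
  rw [this]
  exact foldl_insertBy_lex_pairwise k1 xs [] List.Pairwise.nil

-- the head of B's sorted order is in xs and LexLe-below every element of xs
theorem sorted2_head_min (xs : List Int) (k1 : Int → Int) (m : Int) (t : List Int)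
    (h : PySem.List.sorted2 xs k1 (fun i => i) false = m :: t) :
    m ∈ xs ∧ ∀ y ∈ xs, LexLe k1 m y := by
  have hperm := PySem.List.sorted2_perm xs k1 (fun i => i) false
  rw [h] at hperm
  have hpw := sorted2_lex_pairwise xs k1
  rw [h] at hpw
  refine ⟨hperm.mem_iff.mp (List.mem_cons_self), ?_⟩
  intro y hy
  rcases List.mem_cons.mp (hperm.mem_iff.mpr hy) with rfl | hyt
  · exact lexle_refl k1 y
  · exact (List.pairwise_cons.mp hpw).1 y hyt

-- reference argmin for A's scan: index of first strict improvement over v among xs (from i), else b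
def idxmin : List Int → Int → Int → Int → Int
  | [], _, b, _ => b
  | x :: t, i, b, v => if x < v then idxmin t (i + 1) i x else idxmin t (i + 1) b v

theorem foldl_add_shift (r : List Int) (s : Int) :
    r.foldl (· + ·) s = s + r.foldl (· + ·) 0 := by
  induction r generalizing s with
  | nil => simp
  | cons x t ih => simp [List.foldl_cons, ih (s + x), ih x]; ring

theorem nested_shift (t : List (List Int)) : ∀ (init : Int),
    t.foldl (fun summary string => string.foldl (fun s elm => s + elm) summary) init
      = init + t.foldl (fun summary string => string.foldl (fun s elm => s + elm) summary) 0 := by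
  induction t with
  | nil => intro init; simp
  | cons r u ih =>
    intro init
    simp only [List.foldl_cons]
    rw [ih (List.foldl _ init r), ih (List.foldl _ 0 r), foldl_add_shift r init]
    ring

-- sum of the flattened bitmap (B's generator sum) = A's nested accumulator
theorem flat_sum_eq (bm : List (List Int)) : (bm.flatMap (fun row => row)).sum = bitmap_sum bm := by
  unfold bitmap_sum
  induction bm with
  | nil => rfl
  | cons r t ih =>
    simp only [List.flatMap_cons, List.sum_append, List.foldl_cons, ih]
    rw [nested_shift t (List.foldl (fun s elm => s + elm) 0 r), List.sum_eq_foldl]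

theorem loopA (l : List Int) (m : Nat) : ∀ (k b : Nat), k + m = l.length → b < l.length →
    (PySem.List.pyRange (k : Int) (l.length : Int) 1).foldl
      (fun sm i => if PySem.List.pyGetD l i 0 < PySem.List.pyGetD l sm 0 then i else sm)
      (b : Int)
    = idxmin (l.drop k) (k : Int) (b : Int) (l.getD b 0) := by
  induction m with
  | zero =>
    intro k b hk hb
    rw [PySem.List.pyRange_one_eq_nil (by omega)]
    rw [List.drop_eq_nil_of_le (by omega)]
    rfl
  | succ m ih =>
    intro k b hk hb
    have hkl : k < l.length := by omega
    rw [PySem.List.pyRange_one_cons (by exact_mod_cast hkl)]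
    simp only [List.foldl_cons]
    rw [List.drop_eq_getElem_cons hkl]
    simp only [idxmin, PySem.List.pyGetD_natCast]
    have hgb : l.getD b 0 = l[b] := List.getD_eq_getElem l 0 hb
    have hgk : l.getD k 0 = l[k] := List.getD_eq_getElem l 0 hkl
    by_cases h : l[k] < l[b]
    · rw [if_pos (by rw [hgb, hgk]; exact h)]
      rw [hgb, if_pos h]
      have := ih (k + 1) k (by omega) hkl
      push_cast at this
      rw [hgk] at this
      exact this
    · rw [if_neg (by rw [hgb, hgk]; exact h)]
      rw [hgb, if_neg h]
      have := ih (k + 1) b (by omega) hb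
      push_cast at this
      rw [hgb] at this
      exact this

-- what A's scan computes: the first index of minimal value
def FirstMin (l : List Int) (r : Int) : Prop :=
  0 ≤ r ∧ r.toNat < l.length ∧ (∀ j : Nat, j < l.length → l.getD r.toNat 0 ≤ l.getD j 0) ∧
    (∀ j : Nat, (j : Int) < r → l.getD r.toNat 0 < l.getD j 0)

theorem idxmin_first (l : List Int) (m : Nat) : ∀ (k b : Nat), k + m = l.length → b < l.length →
    (∀ j : Nat, j < k → l.getD b 0 ≤ l.getD j 0) → (∀ j : Nat, j < b → l.getD b 0 < l.getD j 0) →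
    FirstMin l (idxmin (l.drop k) (k : Int) (b : Int) (l.getD b 0)) := by
  induction m with
  | zero =>
    intro k b hk hb hle hlt
    rw [List.drop_eq_nil_of_le (by omega)]
    simp only [idxmin, FirstMin, Int.toNat_natCast]
    exact ⟨Int.natCast_nonneg b, hb, fun j hj => hle j (by omega),
      fun j hj => hlt j (by exact_mod_cast hj)⟩
  | succ m ih =>
    intro k b hk hb hle hlt
    have hkl : k < l.length := by omega
    rw [List.drop_eq_getElem_cons hkl]
    simp only [idxmin]
    have hgk : l.getD k 0 = l[k] := List.getD_eq_getElem l 0 hkl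
    have hgb : l.getD b 0 = l[b] := List.getD_eq_getElem l 0 hb
    by_cases h : l[k] < l.getD b 0
    · rw [if_pos h]
      have hres := ih (k + 1) k (by omega) hkl
          (fun j hj => by
            rcases Nat.lt_succ_iff_lt_or_eq.mp hj with hj | rfl
            · exact le_trans (hgk ▸ le_of_lt h) (hle j hj)
            · exact le_refl _)
          (fun j hj => lt_of_lt_of_le (hgk ▸ h) (hle j hj))
      push_cast at hres
      rw [hgk] at hres
      exact hres
    · rw [if_neg h]
      have hres := ih (k + 1) b (by omega) hb
          (fun j hj => by
            rcases Nat.lt_succ_iff_lt_or_eq.mp hj with hj | rfl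
            · exact hle j hj
            · exact hgk ▸ not_lt.mp h)
          hlt
      push_cast at hres
      exact hres

-- the keys B sorts by agree with A's sums list on in-range indices
theorem bm_key_eq (bitmaps : List (List (List Int))) (i : Nat) (hi : i < bitmaps.length) :
    bm_key bitmaps (i : Int) = (bitmaps.map bitmap_sum).getD i 0 := by
  unfold bm_key
  rw [PySem.List.pyGet?_natCast, List.getElem?_eq_getElem hi]
  simp only [Option.getD_some]
  rw [flat_sum_eq, List.getD_eq_getElem (bitmaps.map bitmap_sum) 0 (by simpa using hi),
    List.getElem_map]

-- ===== VERDICT (by name: the statement is the Claim_ definition above) =====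
theorem get_smallest_bitmap_spec : Claim_equal_get_smallest_bitmap := by
  intro bitmaps _ hpre
  unfold Spec_get_smallest_bitmap get_smallest_bitmap get_smallest_bitmap_alt
  simp only [PySem.List.foldl_append_singleton_eq_map, List.nil_append]
  set l := bitmaps.map bitmap_sum with hl
  have hlen : l.length = bitmaps.length := by simp [hl]
  have hpos : 0 < bitmaps.length := List.length_pos_iff.mpr hpre
  -- A's side: the scan is the first index of minimal sum
  have hA0 := loopA l l.length 0 0 (by omega) (by omega)
  simp only [Nat.cast_zero, List.drop_zero] at hA0
  rw [hA0]
  have hFM : FirstMin l (idxmin l 0 0 (l.getD 0 0)) := by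
    have := idxmin_first l l.length 0 0 (by omega) (by omega)
        (fun j hj => by omega) (fun j hj => by omega)
    simpa using this
  set a := idxmin l 0 0 (l.getD 0 0) with ha
  obtain ⟨ha0, haL, hamin, hafirst⟩ := hFM
  -- B's side: the sorted order is nonempty, its head is lex-minimal
  obtain ⟨m, t, hmt⟩ : ∃ m t,
      PySem.List.sorted2 (PySem.List.pyRange 0 (bitmaps.length : Int) 1)
        (bm_key bitmaps) (fun i => i) false = m :: t := by
    cases hs : PySem.List.sorted2 (PySem.List.pyRange 0 (bitmaps.length : Int) 1)
        (bm_key bitmaps) (fun i => i) false with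
    | nil =>
      have hperm := PySem.List.sorted2_perm (PySem.List.pyRange 0 (bitmaps.length : Int) 1)
          (bm_key bitmaps) (fun i => i) false
      rw [hs] at hperm
      have := hperm.length_eq
      rw [PySem.List.length_pyRange_one] at this
      simp at this
      omega
    | cons m t => exact ⟨m, t, rfl⟩
  obtain ⟨hmem, hmin⟩ := sorted2_head_min _ _ _ _ hmt
  rw [hmt]
  simp only [PySem.List.pyGet?, PySem.List.pyIdx?]
  norm_num
  -- m = a
  obtain ⟨hm0, hmn⟩ := (PySem.List.mem_pyRange_one).mp hmem
  have hamem : (a.toNat : Int) ∈ PySem.List.pyRange 0 (bitmaps.length : Int) 1 := by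
    rw [PySem.List.mem_pyRange_one]
    constructor
    · positivity
    · exact_mod_cast hlen ▸ haL
  have hkeya : bm_key bitmaps (a.toNat : Int) = l.getD a.toNat 0 :=
    bm_key_eq bitmaps a.toNat (hlen ▸ haL)
  have hkeym : bm_key bitmaps m = l.getD m.toNat 0 := by
    have := bm_key_eq bitmaps m.toNat (by omega)
    rwa [Int.toNat_of_nonneg hm0] at this
  have hacast : (a.toNat : Int) = a := Int.toNat_of_nonneg ha0
  rw [hacast] at hkeya
  have hma : m = a := by
    have hR := hmin _ hamem
    rw [hacast] at hR
    have h1 : l.getD m.toNat 0 ≤ l.getD a.toNat 0 := by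
      rcases hR with h | ⟨h, _⟩
      · rw [hkeym, hkeya] at h; omega
      · rw [hkeym, hkeya] at h; omega
    have h2 : l.getD a.toNat 0 ≤ l.getD m.toNat 0 := hamin m.toNat (by omega)
    have heq : l.getD a.toNat 0 = l.getD m.toNat 0 := le_antisymm h2 h1
    rcases hR with h | ⟨_, hle⟩
    · rw [hkeym, hkeya] at h; omega
    · -- m ≤ a; if m < a then a's first-minimality is contradicted
      by_contra hne
      have hmlta : m < a := lt_of_le_of_ne hle hne
      have := hafirst m.toNat (by rwa [Int.toNat_of_nonneg hm0])
      omega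
  rw [hma]
  exact ⟨rfl, rfl⟩
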